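-- pv_equiv track=rewrite | github.com/SnakeMistake/rosalind | textbook/scripts/ba2a.py | check_neighbors_against_strands
-- ===== SOURCE A (Python) =====
-- def neighbors(pattern,d):
-- 	if d == 0:
-- 		return pattern
-- 	if len(pattern) ==1:
-- 		return ["A","C","G","T"]
-- 	neighborhood = set()
-- 	suffix_neighbors = neighbors(pattern[1:],d)
-- 	for suffix in suffix_neighbors:
-- 		hamming_dist = 0
-- 		for i in range(len(suffix)):
-- 			if suffix[i] != pattern[1:][i]:
-- 				hamming_dist += 1
-- 		if hamming_dist < d:
-- 			for base in "ACGT":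
-- 				neighborhood.add(base + suffix)
-- 		else:
-- 			neighborhood.add(pattern[0]+suffix)
-- 	return neighborhood
--
-- def check_neighbors_against_strands(k,d,strands):
-- 	motifs = set()
-- 	for i in range(len(strands[0])-k+1):
-- 		pattern = strands[0][i:i+k]
-- 		candidates = neighbors(pattern,d)
-- 		for candidate in candidates:
-- 			count = 0
-- 			for strand in strands:
-- 				pool = set()
-- 				for i in range(len(strand)-k+1):
-- 					new_additions = neighbors(strand[i:i+k],d)
-- 					for item in new_additions:
-- 						pool.add(item)
-- 				if candidate in pool:
-- 					count += 1
-- 			if count == len(strands):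
-- 				motifs.add(candidate)
-- 	return motifs
-- ===== SOURCE B (Python) =====
-- def neighbors(pattern,d):
-- 	if d == 0:
-- 		return pattern
-- 	if len(pattern) ==1:
-- 		return ["A","C","G","T"]
-- 	neighborhood = set()
-- 	suffix_neighbors = neighbors(pattern[1:],d)
-- 	for suffix in suffix_neighbors:
-- 		hamming_dist = 0
-- 		for i in range(len(suffix)):
-- 			if suffix[i] != pattern[1:][i]:
-- 				hamming_dist += 1
-- 		if hamming_dist < d:
-- 			for base in "ACGT":
-- 				neighborhood.add(base + suffix)
-- 		else:
-- 			neighborhood.add(pattern[0]+suffix)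
-- 	return neighborhood
--
-- def check_neighbors_against_strands(k, d, strands):
-- 	# Precompute each strand's neighbor pool once, then one membership test per
-- 	# (candidate, strand) instead of rebuilding every pool for every candidate.
-- 	if len(strands[0]) - k + 1 <= 0:
-- 		return set()  # the first strand has no k-window, so there are no candidates
-- 	pools = []
-- 	for strand in strands:
-- 		pool = set()
-- 		for j in range(len(strand) - k + 1):
-- 			for item in neighbors(strand[j:j + k], d):
-- 				pool.add(item)
-- 		pools.append(pool)
-- 	motifs = set()
-- 	for i in range(len(strands[0]) - k + 1):
-- 		for candidate in neighbors(strands[0][i:i + k], d):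
-- 			if all(candidate in pool for pool in pools):
-- 				motifs.add(candidate)
-- 	return motifs
-- ===== Notes on version B (the rewrite author's own statement) =====
-- stated objective: alternative
-- what changed: B returns early when the first strand has no k-window, precomputes each strand's neighbor pool once up front, and tests every candidate against the stored pools with all(), instead of rebuilding every strand's pool from scratch for each candidate and counting matches.
import Mathlib
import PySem

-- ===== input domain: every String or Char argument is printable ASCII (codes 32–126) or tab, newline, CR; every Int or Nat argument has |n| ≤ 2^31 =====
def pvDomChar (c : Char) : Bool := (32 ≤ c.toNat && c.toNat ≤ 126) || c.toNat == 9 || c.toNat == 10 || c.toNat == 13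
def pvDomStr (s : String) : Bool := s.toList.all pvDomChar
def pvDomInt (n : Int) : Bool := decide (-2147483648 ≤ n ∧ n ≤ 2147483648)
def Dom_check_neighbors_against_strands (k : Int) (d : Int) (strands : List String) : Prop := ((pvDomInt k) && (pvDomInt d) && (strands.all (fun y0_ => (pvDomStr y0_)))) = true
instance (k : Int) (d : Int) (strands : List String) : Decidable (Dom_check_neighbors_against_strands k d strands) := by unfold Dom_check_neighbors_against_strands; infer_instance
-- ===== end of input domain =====

-- B returns early when the first strand has no k-window, precomputes every strand's neighbor
-- pool once (instead of rebuilding all pools for each candidate) and tests each candidate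
-- against the stored pools with a single all-pools pass.


-- ===== PORT A =====
-- The module helper 'neighbors' (used verbatim by both A and B). Strings are handled as List Char.
-- Python returns: the STRING pattern when d == 0 (iterating it yields its characters, modelled as
-- the list of 1-character strings), the list ["A","C","G","T"] when len(pattern) == 1, and a set
-- otherwise. On the empty pattern with d ≠ 0 Python recurses forever (RecursionError, excluded by
-- Pre_); the '≤ 1' guard only makes that case total.
def pvNeighbors (pattern : List Char) (d : Int) : List (List Char) :=
  if d = 0 then pattern.map (fun c => [c])
  else if pattern.length ≤ 1 then [['A'], ['C'], ['G'], ['T']]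
  else
    (pvNeighbors (pattern.drop 1) d).foldl (fun neighborhood suffix =>
      let hamming_dist := (PySem.List.pyRange 0 (suffix.length : Int) 1).foldl
        (fun h i =>
          if PySem.List.pyGet? suffix i ≠ PySem.List.pyGet? (pattern.drop 1) i then h + 1 else h)
        (0 : Int)
      if hamming_dist < d then
        ['A', 'C', 'G', 'T'].foldl (fun nb base => PySem.Set.add nb (base :: suffix)) neighborhood
      else
        -- pattern[0]: pattern has length ≥ 2 in this branch, so the index is in range
        PySem.Set.add neighborhood (PySem.List.pyGetD pattern 0 'A' :: suffix))
      PySem.Set.empty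
termination_by pattern.length
decreasing_by simp; omega

def check_neighbors_against_strands (k : Int) (d : Int) (strands : List String) : List String :=
  match strands with
  | [] => []  -- Python raises IndexError on strands[0]; excluded by Pre_
  | s0 :: _ =>
    let cs0 := s0.toList
    ((PySem.List.pyRange 0 ((cs0.length : Int) - k + 1) 1).foldl (fun motifs i =>
      let pattern := PySem.List.slice cs0 (some i) (some (i + k))
      let candidates := pvNeighbors pattern d
      candidates.foldl (fun motifs candidate =>
        let count := strands.foldl (fun (count : Int) strand =>
          let t := strand.toList
          let pool := (PySem.List.pyRange 0 ((t.length : Int) - k + 1) 1).foldl (fun pool j =>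
            (pvNeighbors (PySem.List.slice t (some j) (some (j + k))) d).foldl
              (fun pool item => PySem.Set.add pool item) pool) PySem.Set.empty
          if PySem.Set.contains pool candidate then count + 1 else count) 0
        if count = (strands.length : Int) then PySem.Set.add motifs candidate else motifs)
        motifs)
      PySem.Set.empty).map (fun m => String.ofList m)

-- ===== PORT B =====
def check_neighbors_against_strands_alt (k : Int) (d : Int) (strands : List String) : List String :=
  if ((strands.headD "").toList.length : Int) - k + 1 ≤ 0 then []
    -- the first strand has no k-window, so there are no candidates (Python: len(strands[0]);
    -- strands = [] raises IndexError there, excluded by Pre_)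
  else
  let pools := strands.foldl (fun pools strand =>
    let t := strand.toList
    let pool := (PySem.List.pyRange 0 ((t.length : Int) - k + 1) 1).foldl (fun pool j =>
      (pvNeighbors (PySem.List.slice t (some j) (some (j + k))) d).foldl
        (fun pool item => PySem.Set.add pool item) pool) PySem.Set.empty
    pools ++ [pool]) []
  match strands with
  | [] => []  -- Python raises IndexError on strands[0]; excluded by Pre_
  | s0 :: _ =>
    let cs0 := s0.toList
    ((PySem.List.pyRange 0 ((cs0.length : Int) - k + 1) 1).foldl (fun motifs i =>
      (pvNeighbors (PySem.List.slice cs0 (some i) (some (i + k))) d).foldl (fun motifs candidate =>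
        if pools.all (fun pool => PySem.Set.contains pool candidate) then
          PySem.Set.add motifs candidate
        else motifs)
        motifs)
      PySem.Set.empty).map (fun m => String.ofList m)

-- ===== PRECONDITION & SPEC =====
-- Pre_ excludes exactly the inputs where the Python A raises: strands = [] (IndexError on
-- strands[0]) and d ≠ 0 with k ≤ 0 (neighbors('', d) recurses forever: RecursionError).
def Pre_check_neighbors_against_strands (k : Int) (d : Int) (strands : List String) : Prop :=
  strands ≠ [] ∧ (d = 0 ∨ 1 ≤ k)
instance (k : Int) (d : Int) (strands : List String) : Decidable (Pre_check_neighbors_against_strands k d strands) := by unfold Pre_check_neighbors_against_strands; infer_instance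

def pvWitness_check_neighbors_against_strands : Int × Int × List String := (3, 1, ["ACGTC", "CGTAA"])

def Spec_check_neighbors_against_strands (k : Int) (d : Int) (strands : List String) (out : List String) : Prop := out = check_neighbors_against_strands_alt k d strands
instance (k : Int) (d : Int) (strands : List String) (out : List String) : Decidable (Spec_check_neighbors_against_strands k d strands out) := by unfold Spec_check_neighbors_against_strands; infer_instance

-- ===== CLAIM (what is proved, stated in full; the proofs are below) =====
def Claim_equal_check_neighbors_against_strands : Prop := ∀ (k : Int) (d : Int) (strands : List String), Dom_check_neighbors_against_strands k d strands → Pre_check_neighbors_against_strands k d strands → Spec_check_neighbors_against_strands k d strands (check_neighbors_against_strands k d strands)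

-- ===== LEMMAS AND PROOFS =====

-- A's per-candidate count over the strands reaches len(strands) exactly when every strand's pool
-- contains the candidate.
theorem pv_count_eq_length_iff {α : Type} (p : α → Bool) (l : List α) :
    (l.foldl (fun (c : Int) x => if p x then c + 1 else c) 0 = (l.length : Int)) ↔ l.all p := by
  rw [PySem.List.foldl_count_if p l 0, List.all_eq_true]
  constructor
  · intro h x hx
    have hle : l.countP p ≤ l.length := List.countP_le_length
    have : l.countP p = l.length := by omega
    exact (List.countP_eq_length.mp this) x hx
  · intro h
    rw [List.countP_eq_length.mpr h]
    omega

theorem check_neighbors_against_strands_eq (k : Int) (d : Int) (strands : List String) :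
    check_neighbors_against_strands k d strands = check_neighbors_against_strands_alt k d strands := by
  unfold check_neighbors_against_strands check_neighbors_against_strands_alt
  cases strands with
  | nil => simp
  | cons s0 rest =>
    by_cases hw : ((s0.toList.length : Int)) - k + 1 ≤ 0
    case pos =>
      simp only [List.headD_cons, hw, if_pos]
      rw [PySem.List.pyRange_one_eq_nil (by omega)]
      simp
    case neg =>
    simp only [List.headD_cons, hw, if_false]
    rw [PySem.List.foldl_append_singleton_eq_map]
    simp only [List.nil_append, List.all_map, Function.comp_def]
    simp only [pv_count_eq_length_iff]

-- ===== VERDICT (by name: the statement is the Claim_ definition above) =====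
theorem check_neighbors_against_strands_spec : Claim_equal_check_neighbors_against_strands := by
  intro k d strands _ _
  unfold Spec_check_neighbors_against_strands
  exact check_neighbors_against_strands_eq k d strands
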